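-- pv_equiv track=rewrite | github.com/wonyoung94/algo | programmers/스터디/20231112/공던지기/sol.py | solution
-- ===== SOURCE A (Python) =====
-- from collections import deque
--
-- def solution(numbers, k):
--     n = len(numbers)
--     answer = []
--
--     # 일단 deque를 써서 원형 큐를 만들어줍니다....
--     circular_queue = deque(numbers)
--     for i in range(k):
--         # 두칸씩 미뤄줍시다... ( . . . 1 2 3 4 1 2 3 4 1 2 3 4 . . . )
--         circular_queue.rotate(-2)
--         answer.append(circular_queue[0]) # 3 1 3 1 3 1 3 1
--
--     return answer[k-2]
-- ===== SOURCE B (Python) =====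
-- def solution(numbers, k):
--     # O(1): the i-th value appended by the rotating queue (1-based) is
--     # numbers[(2*i) % n]; the result answer[k-2] is entry k-1 for k >= 2
--     # and, via answer[-1], the last entry (i = k) when k == 1.
--     n = len(numbers)
--     i = k - 1 if k >= 2 else k
--     return numbers[(2 * i) % n]
-- ===== Notes on version B (the rewrite author's own statement) =====
-- stated objective: faster
-- what changed: Replaced the deque simulation (k rotations building an answer list) by a direct modular-index formula numbers[(2*i) % n] with i = k-1 for k >= 2 and i = k for k == 1 (A's answer[-1] case).
import Mathlib
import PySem

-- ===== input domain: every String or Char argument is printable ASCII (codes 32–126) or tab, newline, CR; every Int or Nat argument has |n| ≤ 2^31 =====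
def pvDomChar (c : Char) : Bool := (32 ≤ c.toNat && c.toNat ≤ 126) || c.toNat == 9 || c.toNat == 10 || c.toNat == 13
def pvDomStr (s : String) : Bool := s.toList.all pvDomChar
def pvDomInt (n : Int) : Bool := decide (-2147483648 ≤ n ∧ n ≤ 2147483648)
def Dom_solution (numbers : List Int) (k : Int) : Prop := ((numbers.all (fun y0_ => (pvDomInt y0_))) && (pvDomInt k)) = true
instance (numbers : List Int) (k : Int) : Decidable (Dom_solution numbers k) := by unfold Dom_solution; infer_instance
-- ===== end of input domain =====

-- B replaces A's deque simulation (k rotations building a list) by a direct modular-index formula.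

-- ===== PORT A =====
-- deque.rotate(-2): move the front two elements (in order) to the back
def pvRot2 (l : List Int) : List Int :=
  match l with
  | [] => []
  | [x] => [x]
  | x :: y :: xs => xs ++ [x, y]

-- one loop iteration: circular_queue.rotate(-2); answer.append(circular_queue[0])
def pvStep (s : List Int × Array Int) (_i : Int) : List Int × Array Int :=
  let q := pvRot2 s.1
  (q, s.2.push ((PySem.List.pyGet? q 0).getD 0))

def solution (numbers : List Int) (k : Int) : Int :=
  (PySem.List.pyGet?
    ((PySem.List.pyRange 0 k 1).foldl pvStep (numbers, #[])).2.toList (k - 2)).getD 0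

-- ===== PORT B =====
def solution_alt (numbers : List Int) (k : Int) : Int :=
  (PySem.List.pyGet? numbers
    (PySem.Int.mod (2 * (if 2 ≤ k then k - 1 else k)) (numbers.length : Int))).getD 0

-- ===== PRECONDITION & SPEC =====
-- A raises IndexError exactly when numbers is empty (circular_queue[0]) or k < 1 (answer[k-2] on a too-short list).
def Pre_solution (numbers : List Int) (k : Int) : Prop := numbers ≠ [] ∧ 1 ≤ k
instance (numbers : List Int) (k : Int) : Decidable (Pre_solution numbers k) := by unfold Pre_solution; infer_instance
def pvWitness_solution : List Int × Int := ([1, 2, 3], 2)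

def Spec_solution (numbers : List Int) (k : Int) (out : Int) : Prop := out = solution_alt numbers k
instance (numbers : List Int) (k : Int) (out : Int) : Decidable (Spec_solution numbers k out) := by unfold Spec_solution; infer_instance

-- ===== CLAIM (what is proved, stated in full; the proofs are below) =====
def Claim_equal_solution : Prop := ∀ (numbers : List Int) (k : Int), Dom_solution numbers k → Pre_solution numbers k → Spec_solution numbers k (solution numbers k)

-- ===== LEMMAS AND PROOFS =====

theorem pvRot2_eq_rotate (l : List Int) : pvRot2 l = l.rotate 2 := by
  match l with
  | [] => simp [pvRot2]
  | [x] => simp [pvRot2]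
  | x :: y :: xs => simp [pvRot2, List.rotate_cons_succ]

-- the loop body ignores the loop variable, so the foldl is an iterate
theorem foldl_pvStep (l : List Nat) (s : List Int × Array Int) :
    l.foldl (fun t (j : Nat) => pvStep t (j : Int)) s = (fun t => pvStep t 0)^[l.length] s := by
  induction l generalizing s with
  | nil => simp
  | cons a l ih =>
    simp only [List.foldl_cons, List.length_cons, Function.iterate_succ_apply, ih]
    rfl

-- invariant of the loop
theorem iter_pvStep (numbers : List Int) (m : Nat) :
    (fun t => pvStep t 0)^[m] (numbers, #[]) =
      (numbers.rotate (2 * m),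
       ((List.range m).map
         (fun j => (PySem.List.pyGet? (numbers.rotate (2 * j + 2)) 0).getD 0)).toArray) := by
  induction m with
  | zero => simp
  | succ m ih =>
    rw [Function.iterate_succ_apply', ih]
    simp only [pvStep, pvRot2_eq_rotate, List.rotate_rotate, List.range_succ, List.map_append,
      List.map_cons, List.map_nil, List.push_toArray]
    rw [show 2 * m + 2 = 2 * (m + 1) from by omega]

-- head of a rotation, as the Python expression A uses
theorem hd_rotate (numbers : List Int) (hn : numbers ≠ []) (m : Nat) :
    (PySem.List.pyGet? (numbers.rotate m) 0).getD 0
      = numbers.getD (m % numbers.length) 0 := by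
  have hlen : 0 < numbers.length := List.length_pos_of_ne_nil hn
  have h0 : 0 < (numbers.rotate m).length := by simp [hlen]
  have hm : m % numbers.length < numbers.length := Nat.mod_lt _ hlen
  rw [PySem.List.pyGet?_zero, List.getElem?_eq_getElem h0, List.getElem_rotate,
    List.getD_eq_getElem?_getD, List.getElem?_eq_getElem hm]
  simp

-- B's indexing expression at a 2*i that equals the Nat m
theorem b_val (numbers : List Int) (hn : numbers ≠ []) (m : Nat) (i : Int)
    (hi : 2 * i = ((m : Int))) :
    (PySem.List.pyGet? numbers (PySem.Int.mod (2 * i) (numbers.length : Int))).getD 0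
      = numbers.getD (m % numbers.length) 0 := by
  have hlen : 0 < numbers.length := List.length_pos_of_ne_nil hn
  have hm : m % numbers.length < numbers.length := Nat.mod_lt _ hlen
  rw [hi, PySem.Int.mod_natCast, PySem.List.pyGet?_natCast,
    List.getD_eq_getElem?_getD, List.getElem?_eq_getElem hm]

-- ===== VERDICT (by name: the statement is the Claim_ definition above) =====
theorem solution_spec : Claim_equal_solution := by
  intro numbers k _hdom hpre
  obtain ⟨hn, hk⟩ := hpre
  have hlen : 0 < numbers.length := List.length_pos_of_ne_nil hn
  unfold Spec_solution solution solution_alt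
  have hrange : PySem.List.pyRange 0 k 1 = (List.range k.toNat).map (fun j : Nat => (j : Int)) := by
    rw [PySem.List.pyRange_one]
    simp
  rw [hrange, List.foldl_map, foldl_pvStep, List.length_range, iter_pvStep]
  by_cases h2 : 2 ≤ k
  · -- answer[k-2] with 0 ≤ k-2 < k
    have hm : (k - 2).toNat < k.toNat := by omega
    rw [PySem.List.pyGet?_of_nonneg _ (by omega)]
    rw [List.getElem?_map, List.getElem?_range hm]
    simp only [Option.map_some, Option.getD_some]
    rw [hd_rotate numbers hn, if_pos h2]
    exact (b_val numbers hn (2 * (k - 2).toNat + 2) (k - 1) (by push_cast; omega)).symm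
  · -- k = 1 : answer[-1], the single (last) appended element
    have hk1 : k = 1 := by omega
    subst hk1
    norm_num
    rw [PySem.List.pyGet?_neg_one]
    simp only [List.getLast?_singleton, Option.getD_some]
    rw [hd_rotate numbers hn 2]
    have hb := b_val numbers hn 2 1 (by norm_num)
    norm_num at hb
    exact hb.symm
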